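-- pv_equiv track=rewrite | github.com/Wulfic/Cicada3301 | Tools/p20_old_english.py | to_digraph_text
-- ===== SOURCE A (Python) =====
-- def to_digraph_text(text):
--     """Convert text showing digraphs"""
--     result = []
--     i = 0
--     while i < len(text):
--         if i + 1 < len(text) and text[i:i+2] in ['TH', 'EO', 'NG', 'OE', 'AE', 'EA', 'IA']:
--             result.append('[' + text[i:i+2] + ']')
--             i += 2
--         else:
--             result.append(text[i])
--             i += 1
--     return ''.join(result)
-- ===== SOURCE B (Python) =====
-- import re
--
-- _DIGRAPH_RE = re.compile(r'(TH|EO|NG|OE|AE|EA|IA)')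
--
-- def to_digraph_text(text):
--     """Convert text showing digraphs"""
--     return _DIGRAPH_RE.sub(r'[\1]', text)
-- ===== Notes on version B (the rewrite author's own statement) =====
-- stated objective: idiomatic
-- what changed: Replaces the manual index/while scan with a buffered result list by a single precompiled regex substitution (leftmost non-overlapping alternation), delegating the traversal to the regex engine's C loop.
import Mathlib
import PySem

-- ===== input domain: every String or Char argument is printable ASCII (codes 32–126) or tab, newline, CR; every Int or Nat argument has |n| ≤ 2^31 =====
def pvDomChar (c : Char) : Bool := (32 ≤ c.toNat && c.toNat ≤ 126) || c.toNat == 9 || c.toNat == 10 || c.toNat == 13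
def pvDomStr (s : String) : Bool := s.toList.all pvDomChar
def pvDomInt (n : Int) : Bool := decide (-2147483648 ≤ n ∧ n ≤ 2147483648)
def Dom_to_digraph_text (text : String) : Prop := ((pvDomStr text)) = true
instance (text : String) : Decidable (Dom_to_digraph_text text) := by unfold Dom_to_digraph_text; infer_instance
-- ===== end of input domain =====

-- B replaces A's manual index/while scan with a single regex substitution; same return value, no side effects.

-- ===== PORT A =====
-- the list literal ['TH', 'EO', ...] of A, as lists of chars (strings are ported on the List Char side)
def digraphsA : List (List Char) :=
  [['T','H'], ['E','O'], ['N','G'], ['O','E'], ['A','E'], ['E','A'], ['I','A']]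

-- the while loop of A: index i, accumulator `result` (list of string-chunks); text[i:i+2] is a Python
-- slice (PySem.List.slice), text[i] is an in-range index (ported as getD; i < len holds on that branch)
def loopA (cs : List Char) (i : Int) (res : List (List Char)) : List (List Char) :=
  if _h : i < (cs.length : Int) then
    if i + 1 < (cs.length : Int) ∧ PySem.List.slice cs (some i) (some (i + 2)) ∈ digraphsA then
      loopA cs (i + 2) (res ++ [['['] ++ PySem.List.slice cs (some i) (some (i + 2)) ++ [']']])
    else
      loopA cs (i + 1) (res ++ [[PySem.List.pyGetD cs i ' ']])
  else res
termination_by ((cs.length : Int) - i).toNat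
decreasing_by all_goals omega

def to_digraph_text (text : String) : String :=
  String.ofList (loopA text.toList 0 []).flatten   -- ''.join(result)

-- ===== PORT B =====
-- the alternation branches (TH|EO|NG|OE|AE|EA|IA) of B's compiled regex, as char pairs
def digraphsB : List (Char × Char) :=
  [('T','H'), ('E','O'), ('N','G'), ('O','E'), ('A','E'), ('E','A'), ('I','A')]

-- re.sub with this fixed two-char alternation: leftmost non-overlapping matching — scan left to
-- right, wrap a matching two-char window in brackets and resume after it, else emit one char.
-- (Hand-port of the regex engine's behaviour for this pattern; exact for it.)
def goB : List Char → List Char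
  | [] => []
  | [c] => [c]
  | a :: b :: rest =>
    if (a, b) ∈ digraphsB then '[' :: a :: b :: ']' :: goB rest
    else a :: goB (b :: rest)
termination_by l => l.length

def to_digraph_text_alt (text : String) : String :=
  String.ofList (goB text.toList)

-- ===== PRECONDITION & SPEC =====
def Spec_to_digraph_text (text : String) (out : String) : Prop := out = to_digraph_text_alt text
instance (text : String) (out : String) : Decidable (Spec_to_digraph_text text out) := by unfold Spec_to_digraph_text; infer_instance

-- ===== CLAIM (what is proved, stated in full; the proofs are below) =====
def Claim_equal_to_digraph_text : Prop := ∀ (text : String), Dom_to_digraph_text text → Spec_to_digraph_text text (to_digraph_text text)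

-- ===== LEMMAS AND PROOFS =====

lemma goB_nil : goB [] = [] := by simp [goB]

lemma goB_single (c : Char) : goB [c] = [c] := by simp [goB]

lemma goB_match (a b : Char) (rest : List Char) (h : (a, b) ∈ digraphsB) :
    goB (a :: b :: rest) = '[' :: a :: b :: ']' :: goB rest := by
  rw [goB, if_pos h]

lemma goB_skip (a b : Char) (rest : List Char) (h : (a, b) ∉ digraphsB) :
    goB (a :: b :: rest) = a :: goB (b :: rest) := by
  rw [goB, if_neg h]

lemma loopA_flatten (n : Nat) : ∀ (cs : List Char) (i : Nat) (res : List (List Char)),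
    cs.length ≤ i + n →
    (loopA cs (i : Int) res).flatten = res.flatten ++ goB (cs.drop i) := by
  induction n with
  | zero =>
    intro cs i res h
    rw [loopA]
    have hni : ¬ ((i : Int) < (cs.length : Int)) := by exact_mod_cast Nat.not_lt.mpr (by omega)
    rw [dif_neg hni, List.drop_eq_nil_of_le (by omega), goB_nil]
    simp
  | succ n ih =>
    intro cs i res h
    rw [loopA]
    by_cases hi : i < cs.length
    · have hi' : (i : Int) < (cs.length : Int) := by exact_mod_cast hi
      rw [dif_pos hi']
      have hcast2 : (i : Int) + 2 = ((i + 2 : Nat) : Int) := by push_cast; ring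
      have hcast1 : (i : Int) + 1 = ((i + 1 : Nat) : Int) := by push_cast; ring
      have hget : PySem.List.pyGetD cs (i : Int) ' ' = cs[i] := by
        simp [PySem.List.pyGetD_natCast, List.getElem?_eq_getElem hi]
      have hslice : PySem.List.slice cs (some (i : Int)) (some ((i : Int) + 2))
          = (cs.drop i).take 2 := by
        rw [hcast2, PySem.List.slice_toNat _ (by positivity) (by positivity)]
        congr 1
        omega
      by_cases hi1 : i + 1 < cs.length
      · have hi1' : (i : Int) + 1 < (cs.length : Int) := by exact_mod_cast hi1
        have htake : (cs.drop i).take 2 = [cs[i], cs[i + 1]] := by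
          rw [List.drop_eq_getElem_cons hi, List.drop_eq_getElem_cons hi1,
            List.take_succ_cons, List.take_succ_cons, List.take_zero]
        by_cases hm : [cs[i], cs[i + 1]] ∈ digraphsA
        · have hmB : (cs[i], cs[i + 1]) ∈ digraphsB := by
            simpa [digraphsB, digraphsA] using hm
          rw [if_pos ⟨hi1', by rw [hslice, htake]; exact hm⟩, hslice, htake, hcast2,
            ih cs (i + 2) _ (by omega)]
          conv_rhs => rw [List.drop_eq_getElem_cons hi, List.drop_eq_getElem_cons hi1,
            goB_match _ _ _ hmB]
          simp
        · have hmB : (cs[i], cs[i + 1]) ∉ digraphsB := by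
            simpa [digraphsB, digraphsA] using hm
          rw [if_neg (by rw [hslice, htake]; tauto), hget, hcast1, ih cs (i + 1) _ (by omega)]
          conv_rhs => rw [List.drop_eq_getElem_cons hi, List.drop_eq_getElem_cons hi1,
            goB_skip _ _ _ hmB, ← List.drop_eq_getElem_cons hi1]
          simp
      · have hdrop : cs.drop (i + 1) = [] := List.drop_eq_nil_of_le (by omega)
        rw [if_neg (fun hc => absurd hc.1 (by exact_mod_cast Nat.not_lt.mpr (by omega))),
          hget, hcast1, ih cs (i + 1) _ (by omega), hdrop, goB_nil]
        conv_rhs => rw [List.drop_eq_getElem_cons hi, hdrop, goB_single]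
        simp
    · have hni : ¬ ((i : Int) < (cs.length : Int)) := by exact_mod_cast Nat.not_lt.mpr (by omega)
      rw [dif_neg hni, List.drop_eq_nil_of_le (by omega), goB_nil]
      simp

-- ===== VERDICT (by name: the statement is the Claim_ definition above) =====
theorem to_digraph_text_spec : Claim_equal_to_digraph_text := by
  intro text _
  unfold Spec_to_digraph_text to_digraph_text to_digraph_text_alt
  have h := loopA_flatten text.toList.length text.toList 0 [] (by omega)
  simpa using congrArg String.ofList h
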